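-- pv_equiv track=rewrite | github.com/wagas165/GNN | hoc_identification.py | find_hocs
-- ===== SOURCE A (Python) =====
-- def find_hocs(connectivity):
--     """根据m阶连通性信息识别HOCs。这里使用的是简化的逻辑，更复杂的场景可能需要更复杂的图遍历算法。"""
--     visited = set()
--     hocs = []
--
--     def dfs(hyperedge, current_hoc):
--         """深度优先搜索识别HOC"""
--         if hyperedge in visited:
--             return
--         visited.add(hyperedge)
--         current_hoc.add(hyperedge)
--         for neighbor in connectivity.get(hyperedge, []):
--             dfs(neighbor, current_hoc)
--
--     for hyperedge in connectivity:
--         if hyperedge not in visited: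
--             current_hoc = set()
--             dfs(hyperedge, current_hoc)
--             hocs.append(current_hoc)
--
--     return hocs
-- ===== SOURCE B (Python) =====
-- def find_hocs(connectivity):
--     """Iterative DFS with an explicit stack (same first-to-claim grouping and order, no recursion)."""
--     visited = set()
--     hocs = []
--     for hyperedge in connectivity:
--         if hyperedge not in visited:
--             current_hoc = set()
--             stack = [hyperedge]
--             while stack:
--                 node = stack.pop()
--                 if node in visited:
--                     continue
--                 visited.add(node)
--                 current_hoc.add(node)
--                 stack.extend(reversed(connectivity.get(node, [])))
--             hocs.append(current_hoc)
--     return hocs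
-- ===== Notes on version B (the rewrite author's own statement) =====
-- stated objective: alternative
-- what changed: The recursive DFS (nested def dfs with call-per-neighbor) is replaced by an iterative explicit-stack traversal with a lazy visited check on pop, reproducing the exact preorder and component grouping without recursion.
import Mathlib
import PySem

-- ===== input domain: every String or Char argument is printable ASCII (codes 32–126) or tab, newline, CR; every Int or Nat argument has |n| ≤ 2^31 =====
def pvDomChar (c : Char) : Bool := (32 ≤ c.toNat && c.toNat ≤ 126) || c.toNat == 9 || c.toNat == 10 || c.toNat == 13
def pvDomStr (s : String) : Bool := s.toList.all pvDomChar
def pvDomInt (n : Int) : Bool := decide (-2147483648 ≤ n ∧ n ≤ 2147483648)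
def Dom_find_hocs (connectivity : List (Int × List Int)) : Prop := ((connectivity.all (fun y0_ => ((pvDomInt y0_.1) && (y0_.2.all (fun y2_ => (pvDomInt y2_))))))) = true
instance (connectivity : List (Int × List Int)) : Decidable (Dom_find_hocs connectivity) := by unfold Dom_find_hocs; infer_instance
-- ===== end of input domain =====

-- B replaces A's nested recursive dfs by an explicit-stack iterative DFS (same visit order, no recursion); objective: alternative.

-- helpers for the B-side stack loop's termination (stay above the ports because pvDfsStack's
-- decreasing_by cites them by name)
theorem pvNotContains_mono (vis : PySem.Set Int) (h x : Int)
    (hx : (!(PySem.Set.contains (PySem.Set.add vis h) x)) = true) :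
    (!(PySem.Set.contains vis x)) = true := by
  simp only [Bool.not_eq_true'] at hx ⊢
  cases hb : PySem.Set.contains vis x with
  | false => rfl
  | true =>
    exfalso
    have hmem : x ∈ PySem.Set.add vis h :=
      (PySem.Set.mem_add vis h x).mpr (Or.inl ((PySem.Set.contains_iff vis x).mp hb))
    have := (PySem.Set.contains_iff (PySem.Set.add vis h) x).mpr hmem
    rw [this] at hx
    cases hx

theorem pvCountP_lt_of_mem {univ vis : List Int} {h : Int} (hm : h ∈ univ) (hv : h ∉ vis) :
    (univ.filter (fun x => !(PySem.Set.contains (PySem.Set.add vis h) x))).length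
      < (univ.filter (fun x => !(PySem.Set.contains vis x))).length := by
  simp only [← List.countP_eq_length_filter]
  induction univ with
  | nil => cases hm
  | cons a t ih =>
    have hmono : t.countP (fun x => !(PySem.Set.contains (PySem.Set.add vis h) x))
        ≤ t.countP (fun x => !(PySem.Set.contains vis x)) :=
      List.countP_mono_left (fun x _ => pvNotContains_mono vis h x)
    by_cases hah : a = h
    · subst hah
      have h1 : (!(PySem.Set.contains (PySem.Set.add vis a) a)) = false := by
        have : PySem.Set.contains (PySem.Set.add vis a) a = true :=
          (PySem.Set.contains_iff _ _).mpr ((PySem.Set.mem_add vis a a).mpr (Or.inr rfl))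
        rw [this]; rfl
      have h2 : (!(PySem.Set.contains vis a)) = true := by
        cases hb : PySem.Set.contains vis a with
        | false => rfl
        | true => exact absurd ((PySem.Set.contains_iff vis a).mp hb) hv
      have e1 : (if (!(PySem.Set.contains (PySem.Set.add vis a) a)) = true then 1 else 0) = 0 := by
        rw [h1]; simp
      have e2 : (if (!(PySem.Set.contains vis a)) = true then 1 else 0) = 1 := by
        rw [h2]; simp
      simp only [List.countP_cons, e1, e2]
      omega
    · have ht : h ∈ t := by
        rcases List.mem_cons.mp hm with h' | h'
        · exact absurd h'.symm hah
        · exact h'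
      have ihs := ih ht
      have hc : (if (!(PySem.Set.contains (PySem.Set.add vis h) a)) = true then 1 else 0)
          ≤ (if (!(PySem.Set.contains vis a)) = true then 1 else 0) := by
        by_cases hb : (!(PySem.Set.contains (PySem.Set.add vis h) a)) = true
        · rw [if_pos hb, if_pos (pvNotContains_mono vis h a hb)]
        · rw [if_neg hb]; split <;> omega
      simp only [List.countP_cons]
      omega

-- a key not present returns the default (cited by pvDfsStack's termination proof)
theorem pvGetD_nil_of_not_mem_keys (d : PySem.Dict Int (List Int)) (k : Int) (h : k ∉ d.keys) :
    d.getD k [] = [] := by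
  apply PySem.Dict.getD_of_not_contains
  cases hb : d.contains k with
  | false => rfl
  | true => exact absurd ((PySem.Dict.contains_iff_mem_keys d k).mp hb) h

-- ===== PORT A =====
-- A's inner recursive dfs; the Nat argument is only a fuel guard making the Python recursion
-- structural — find_hocs passes fuel that is proved never to run out (pvDfsA_eq_stack below).
def pvDfsA (d : PySem.Dict Int (List Int)) : Nat → Int → PySem.Set Int × PySem.Set Int → PySem.Set Int × PySem.Set Int
  | 0, _, st => st
  | n+1, h, st =>
    if PySem.Set.contains st.1 h then st
    else (d.getD h []).foldl (fun st' nb => pvDfsA d n nb st')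
           (PySem.Set.add st.1 h, PySem.Set.add st.2 h)

def find_hocs (connectivity : List (Int × List Int)) : List (List Int) :=
  let d := PySem.Dict.ofList connectivity
  let fuel := d.keys.length + d.values.flatten.length + 1
  (d.keys.foldl (fun (st : PySem.Set Int × List (List Int)) h =>
      if PySem.Set.contains st.1 h then st
      else
        let r := pvDfsA d fuel h (st.1, PySem.Set.empty)
        (r.1, st.2 ++ [r.2])) (PySem.Set.empty, [])).2

-- ===== PORT B =====
-- B's while-loop over the explicit stack; the Lean list holds the Python stack reversed
-- (head = top), so Python's stack.pop() is the head and stack.extend(reversed(nbrs)) prepends nbrs.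
def pvDfsStack (d : PySem.Dict Int (List Int)) : List Int → PySem.Set Int × PySem.Set Int → PySem.Set Int × PySem.Set Int
  | [], st => st
  | node :: rest, st =>
    if PySem.Set.contains st.1 node then pvDfsStack d rest st
    else pvDfsStack d (d.getD node [] ++ rest)
           (PySem.Set.add st.1 node, PySem.Set.add st.2 node)
termination_by pending st =>
  (((d.keys ++ d.values.flatten).filter (fun x => !(PySem.Set.contains st.1 x))).length, pending.length)
decreasing_by
  · apply Prod.Lex.right
    simp
  · rename_i hvis
    by_cases hk : node ∈ d.keys
    · apply Prod.Lex.left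
      exact pvCountP_lt_of_mem (List.mem_append_left _ hk)
        (fun hmem => hvis ((PySem.Set.contains_iff _ _).mpr hmem))
    · have hnil := pvGetD_nil_of_not_mem_keys d node hk
      have hK : (((d.keys ++ d.values.flatten).filter
            (fun x => !(PySem.Set.contains (PySem.Set.add st.1 node) x))).length)
          ≤ ((d.keys ++ d.values.flatten).filter (fun x => !(PySem.Set.contains st.1 x))).length := by
        simp only [← List.countP_eq_length_filter]
        exact List.countP_mono_left (fun x _ => pvNotContains_mono st.1 node x)
      rcases Nat.lt_or_ge (((d.keys ++ d.values.flatten).filter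
          (fun x => !(PySem.Set.contains (PySem.Set.add st.1 node) x))).length)
          (((d.keys ++ d.values.flatten).filter (fun x => !(PySem.Set.contains st.1 x))).length) with hlt | hge
      · exact Prod.Lex.left _ _ hlt
      · have heq : (((d.keys ++ d.values.flatten).filter
            (fun x => !(PySem.Set.contains (PySem.Set.add st.1 node) x))).length)
            = ((d.keys ++ d.values.flatten).filter (fun x => !(PySem.Set.contains st.1 x))).length :=
          Nat.le_antisymm hK hge
        rw [heq]
        apply Prod.Lex.right
        simp [hnil]

def find_hocs_alt (connectivity : List (Int × List Int)) : List (List Int) :=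
  let d := PySem.Dict.ofList connectivity
  (d.keys.foldl (fun (st : PySem.Set Int × List (List Int)) h =>
      if PySem.Set.contains st.1 h then st
      else
        let r := pvDfsStack d [h] (st.1, PySem.Set.empty)
        (r.1, st.2 ++ [r.2])) (PySem.Set.empty, [])).2

-- ===== PRECONDITION & SPEC =====
def Spec_find_hocs (connectivity : List (Int × List Int)) (out : List (List Int)) : Prop := out = find_hocs_alt connectivity
instance (connectivity : List (Int × List Int)) (out : List (List Int)) : Decidable (Spec_find_hocs connectivity out) := by unfold Spec_find_hocs; infer_instance

-- ===== CLAIM (what is proved, stated in full; the proofs are below) =====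
def Claim_equal_find_hocs : Prop := ∀ (connectivity : List (Int × List Int)), Dom_find_hocs connectivity → Spec_find_hocs connectivity (find_hocs connectivity)

-- ===== LEMMAS AND PROOFS =====

theorem pvDfsStack_nil (d : PySem.Dict Int (List Int)) (st : PySem.Set Int × PySem.Set Int) :
    pvDfsStack d [] st = st := by
  rw [pvDfsStack.eq_def]

theorem pvDfsStack_cons (d : PySem.Dict Int (List Int)) (node : Int) (rest : List Int)
    (st : PySem.Set Int × PySem.Set Int) :
    pvDfsStack d (node :: rest) st =
      if PySem.Set.contains st.1 node then pvDfsStack d rest st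
      else pvDfsStack d (d.getD node [] ++ rest)
             (PySem.Set.add st.1 node, PySem.Set.add st.2 node) := by
  rw [pvDfsStack.eq_def]

-- number of still-unvisited nodes of the fixed universe (the termination measure's first component)
def pvK (d : PySem.Dict Int (List Int)) (vis : PySem.Set Int) : Nat :=
  ((d.keys ++ d.values.flatten).filter (fun x => !(PySem.Set.contains vis x))).length

theorem pvK_le_univ (d : PySem.Dict Int (List Int)) (vis : PySem.Set Int) :
    pvK d vis ≤ d.keys.length + d.values.flatten.length := by
  have := List.length_filter_le (fun x => !(PySem.Set.contains vis x)) (d.keys ++ d.values.flatten)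
  simpa [pvK] using this

theorem pvK_mono (d : PySem.Dict Int (List Int)) {vis vis' : PySem.Set Int}
    (h : ∀ x, x ∈ vis → x ∈ vis') : pvK d vis' ≤ pvK d vis := by
  simp only [pvK, ← List.countP_eq_length_filter]
  apply List.countP_mono_left
  intro x _ hx
  simp only [Bool.not_eq_true'] at hx ⊢
  cases hb : PySem.Set.contains vis x with
  | false => rfl
  | true =>
    exfalso
    have : PySem.Set.contains vis' x = true :=
      (PySem.Set.contains_iff vis' x).mpr (h x ((PySem.Set.contains_iff vis x).mp hb))
    rw [this] at hx
    cases hx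

theorem pvDfsStack_vis_mono (d : PySem.Dict Int (List Int)) (pending : List Int)
    (st : PySem.Set Int × PySem.Set Int) :
    ∀ x, x ∈ st.1 → x ∈ (pvDfsStack d pending st).1 := by
  fun_induction pvDfsStack d pending st with
  | case1 => intro x hx; exact hx
  | case2 node rest st hvis ih => exact ih
  | case3 node rest st hvis ih =>
    intro x hx
    apply ih
    rw [PySem.Set.mem_add]; left; exact hx

theorem pvDfsStack_append (d : PySem.Dict Int (List Int)) (pending : List Int)
    (st : PySem.Set Int × PySem.Set Int) (ys : List Int) :
    pvDfsStack d (pending ++ ys) st = pvDfsStack d ys (pvDfsStack d pending st) := by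
  fun_induction pvDfsStack d pending st with
  | case1 => rfl
  | case2 node rest st hvis ih =>
    rw [List.cons_append, pvDfsStack_cons, if_pos hvis]
    exact ih
  | case3 node rest st hvis ih =>
    rw [List.cons_append, pvDfsStack_cons, if_neg hvis, ← List.append_assoc]
    exact ih

theorem pvDfsA_eq_stack (d : PySem.Dict Int (List Int)) :
    ∀ n node (st : PySem.Set Int × PySem.Set Int), pvK d st.1 < n →
      pvDfsA d n node st = pvDfsStack d [node] st := by
  intro n
  induction n with
  | zero => intro node st h; omega
  | succ n ih =>
    intro node st hlt
    rw [pvDfsA, pvDfsStack_cons]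
    by_cases hvis : PySem.Set.contains st.1 node = true
    · rw [if_pos hvis, if_pos hvis, pvDfsStack_nil]
    · rw [if_neg hvis, if_neg hvis, List.append_nil]
      by_cases hk : node ∈ d.keys
      · -- fuel for the neighbor fold suffices: visiting node strictly shrinks pvK
        have hstep : pvK d (PySem.Set.add st.1 node) < pvK d st.1 :=
          pvCountP_lt_of_mem (List.mem_append_left _ hk)
            (fun hmem => hvis ((PySem.Set.contains_iff _ _).mpr hmem))
        have hbound : pvK d (PySem.Set.add st.1 node) < n := by omega
        -- the neighbor fold equals the stack run, for any list, by induction on the list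
        have main : ∀ (l : List Int) (st2 : PySem.Set Int × PySem.Set Int), pvK d st2.1 < n →
            l.foldl (fun st' nb => pvDfsA d n nb st') st2 = pvDfsStack d l st2 := by
          intro l
          induction l with
          | nil => intro st2 _; rw [List.foldl_nil, pvDfsStack_nil]
          | cons a t iht =>
            intro st2 h2
            rw [List.foldl_cons, ih a st2 h2]
            have h3 : pvK d ((pvDfsStack d [a] st2).1) < n := by
              have := pvK_mono d (vis := st2.1) (vis' := (pvDfsStack d [a] st2).1)
                (pvDfsStack_vis_mono d [a] st2)
              omega
            rw [iht _ h3]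
            have hsplit : (a :: t : List Int) = [a] ++ t := rfl
            rw [hsplit, pvDfsStack_append]
        exact main _ _ hbound
      · rw [pvGetD_nil_of_not_mem_keys d node hk, List.foldl_nil, pvDfsStack_nil]

theorem find_hocs_eq (connectivity : List (Int × List Int)) :
    find_hocs connectivity = find_hocs_alt connectivity := by
  simp only [find_hocs, find_hocs_alt]
  congr 2
  funext st h
  by_cases hvis : PySem.Set.contains st.1 h = true
  · rw [if_pos hvis, if_pos hvis]
  · rw [if_neg hvis, if_neg hvis]
    have hfuel : pvK (PySem.Dict.ofList connectivity) st.1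
        < (PySem.Dict.ofList connectivity).keys.length
          + (PySem.Dict.ofList connectivity).values.flatten.length + 1 := by
      have := pvK_le_univ (PySem.Dict.ofList connectivity) st.1
      omega
    rw [pvDfsA_eq_stack _ _ _ _ hfuel]

-- ===== VERDICT (by name: the statement is the Claim_ definition above) =====
theorem find_hocs_spec : Claim_equal_find_hocs := by
  intro connectivity _
  unfold Spec_find_hocs
  exact find_hocs_eq connectivity
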